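-- pv_equiv track=rewrite | github.com/HollandTS/SequenceMaster | convert.py | convert_vehicle_to_infantry
-- ===== SOURCE A (Python) =====
-- VEHICLE_TO_INFANTRY_KEYS = {
--     ('StartWalkFrame', 'WalkFrames'): 'Walk',
--     ('StartStandFrame', 'StandingFrames'): 'Ready',
--     ('StartDeathFrame', 'DeathFrames'): 'Die1',
--     ('StartFiringFrame', 'FiringFrames'): 'FireUp',
--     ('StartIdleFrame', 'IdleFrames'): 'Idle1',
-- }
--
-- INFANTRY_DIRS = ["N", "NW", "W", "SW", "S", "SE", "E", "NE"]
--
-- VEHICLE_DIRS = ["N", "NE", "E", "SE", "S", "SW", "W", "NW"]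
--
-- def parse_ini(text):
--     result = {}
--     for line in text.splitlines():
--         if '=' in line:
--             k, v = line.split('=', 1)
--             result[k.strip()] = v.strip()
--     return result
--
-- def reorder_block(frames, from_dirs, to_dirs, count):
--     """
--     Reorder a block of frames from one direction order to another.
--     frames: list of frames (main or shadow)
--     from_dirs: current direction order
--     to_dirs: desired direction order
--     count: frames per direction
--     """
--     blocks = [frames[i*count:(i+1)*count] for i in range(len(from_dirs))]
--     dir_map = {d: i for i, d in enumerate(from_dirs)}
--     reordered = []
--     for d in to_dirs:
--         idx = dir_map[d]
--         reordered.extend(blocks[idx])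
--     return reordered
--
-- def extract_vehicle_block(frames, start, count):
--     # For each direction, collect 'count' frames, starting at start + i*count
--     block = []
--     for i in range(8):
--         for j in range(count):
--             idx = start + i*count + j
--             if idx < len(frames):
--                 block.append(frames[idx])
--     return block
--
-- def convert_vehicle_to_infantry(ini_text, frames, shadows):
--     ini = parse_ini(ini_text)
--     infantry_ini = {}
--     new_frames = []
--     new_shadows = []
--     idx = 0
--     for (start_key, count_key), inf_key in VEHICLE_TO_INFANTRY_KEYS.items():
--         if start_key in ini and count_key in ini:
--             start = int(ini[start_key])
--             count = int(ini[count_key])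
--             if count_key == "IdleFrames":
--                 # Only IdleFrames is non-directional
--                 block = [frames[start + j] for j in range(count) if (start + j) < len(frames)]
--                 shadow_block = [shadows[start + j] for j in range(count)] if shadows else None
--                 new_frames.extend(block)
--                 if shadow_block:
--                     new_shadows.extend(shadow_block)
--                 infantry_ini[inf_key] = f"{idx},{count},{count}"
--                 idx += count
--             else:
--                 # All others are directional (8 per direction)
--                 block = extract_vehicle_block(frames, start, count)
--                 shadow_block = extract_vehicle_block(shadows, start, count) if shadows else None
--                 if inf_key in ("Walk", "FireUp", "Ready"):
--                     reordered = reorder_block(block, VEHICLE_DIRS, INFANTRY_DIRS, count)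
--                     reordered_shadows = reorder_block(shadow_block, VEHICLE_DIRS, INFANTRY_DIRS, count) if shadow_block else None
--                     new_frames.extend(reordered)
--                     if reordered_shadows:
--                         new_shadows.extend(reordered_shadows)
--                 else:
--                     # For non-directional infantry keys, just take the first direction's worth
--                     block = block[:count]
--                     shadow_block = shadow_block[:count] if shadow_block else None
--                     new_frames.extend(block)
--                     if shadow_block:
--                         new_shadows.extend(shadow_block)
--                 infantry_ini[inf_key] = f"{idx},{count},{count}"
--                 idx += 8*count if inf_key in ("Walk", "FireUp", "Ready") else count
--     lines = []
--     for key in ['Walk', 'Ready', 'Die1', 'FireUp', 'Idle1']: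
--         if key in infantry_ini:
--             lines.append(f"{key}={infantry_ini[key]}")
--     return '\n'.join(lines), new_frames, new_shadows
-- ===== SOURCE B (Python) =====
-- # Reorder vehicle-sprite frames into infantry layout and build the infantry ini:
-- # for each key, compute the list of source frame indices directly (using the
-- # vehicle-to-infantry direction permutation for directional keys) and gather
-- # them with one uniform bound-filtered pass over frames and over shadows.
--
-- _PERM = [0, 7, 6, 5, 4, 3, 2, 1]  # vehicle-order position of each infantry direction
--
-- _SPECS = [
--     ('StartWalkFrame', 'WalkFrames', 'Walk', True),
--     ('StartStandFrame', 'StandingFrames', 'Ready', True),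
--     ('StartDeathFrame', 'DeathFrames', 'Die1', False),
--     ('StartFiringFrame', 'FiringFrames', 'FireUp', True),
--     ('StartIdleFrame', 'IdleFrames', 'Idle1', False),
-- ]
--
--
-- def _lookup(lines, key):
--     # last `key=` line wins
--     val = None
--     for line in lines:
--         if '=' in line:
--             k, v = line.split('=', 1)
--             if k.strip() == key:
--                 val = v.strip()
--     return val
--
--
-- def convert_vehicle_to_infantry(ini_text, frames, shadows):
--     lines = ini_text.splitlines()
--     out_lines = []
--     new_frames = []
--     new_shadows = []
--     idx = 0
--     for start_key, count_key, inf_key, directional in _SPECS: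
--         sv = _lookup(lines, start_key)
--         cv = _lookup(lines, count_key)
--         if sv is None or cv is None:
--             continue
--         start = int(sv)
--         count = int(cv)
--         if directional:
--             idxs = [start + p * count + j for p in _PERM for j in range(count)]
--             step = 8 * count
--         else:
--             idxs = [start + j for j in range(count)]
--             step = count
--         new_frames.extend(frames[i] for i in idxs if i < len(frames))
--         if shadows:
--             new_shadows.extend(shadows[i] for i in idxs if i < len(shadows))
--         out_lines.append(f"{inf_key}={idx},{count},{count}")
--         idx += step
--     return '\n'.join(out_lines), new_frames, new_shadows
-- ===== Notes on version B (the rewrite author's own statement) =====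
-- stated objective: simpler
-- what changed: B drops parse_ini's dict build, extract_vehicle_block and reorder_block's block-slice-and-reconcatenate: each ini value is found by a last-match line scan, each of the five keys computes an explicit list of source frame indices (using the vehicle-to-infantry direction permutation for directional keys), and one uniform bound-filtered gather over frames and shadows emits frames and ini lines in a single pass; Pre_ excludes only inputs on which A raises (ValueError from int(), or IndexError from a too-negative start or an out-of-range IdleFrames shadow index).
import Mathlib
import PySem

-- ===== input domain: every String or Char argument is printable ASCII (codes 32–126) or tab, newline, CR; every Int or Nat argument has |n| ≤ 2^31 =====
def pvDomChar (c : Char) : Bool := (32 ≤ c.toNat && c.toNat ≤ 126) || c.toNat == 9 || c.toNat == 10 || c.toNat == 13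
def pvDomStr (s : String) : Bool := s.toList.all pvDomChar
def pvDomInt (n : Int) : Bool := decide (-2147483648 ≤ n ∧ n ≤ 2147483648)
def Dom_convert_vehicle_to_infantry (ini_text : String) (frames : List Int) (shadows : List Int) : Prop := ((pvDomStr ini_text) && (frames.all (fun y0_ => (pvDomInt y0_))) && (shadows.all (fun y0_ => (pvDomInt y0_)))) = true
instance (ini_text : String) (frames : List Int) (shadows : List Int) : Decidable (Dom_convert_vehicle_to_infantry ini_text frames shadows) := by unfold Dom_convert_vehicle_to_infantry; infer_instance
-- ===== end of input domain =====

-- B replaces A's dict-building, block-slicing and slice-reconcatenation by a last-match line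
-- scan plus an explicit source-index table gathered in one uniform pass (objective: simpler).

-- ===== PORT A =====

-- shared with port B: the `'=' in line` test and `line.split('=', 1)` + strip of both halves
def pvLineKV (line : String) : Option (String × String) :=
  if PySem.Str.isIn "=" line then
    let parts := (PySem.Str.splitMax? line "=" 1).getD []
    some (PySem.Str.strip (parts.getD 0 ""), PySem.Str.strip (parts.getD 1 ""))
  else none

-- shared with port B: the f-string f"{idx},{count},{count}"
def fmtEntry (idx count : Int) : String :=
  PySem.Int.toStr idx ++ "," ++ PySem.Int.toStr count ++ "," ++ PySem.Int.toStr count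

def parse_ini (text : String) : PySem.Dict String String :=
  (PySem.Str.splitlines text).foldl (fun d line =>
    match pvLineKV line with
    | some kv => d.insert kv.1 kv.2
    | none => d) PySem.Dict.empty

def extract_vehicle_block (xs : List Int) (start count : Int) : List Int :=
  (PySem.List.pyRange 0 8 1).foldl (fun block i =>
    (PySem.List.pyRange 0 count 1).foldl (fun block j =>
      -- idx = start + i*count + j; frames[idx]: pyGet?.getD is exact here, a raising
      -- (too-negative) index is excluded by Pre_
      if start + i * count + j < (xs.length : Int) then
        block ++ [(PySem.List.pyGet? xs (start + i * count + j)).getD 0]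
      else block) block) []

def VEHICLE_DIRS : List String := ["N", "NE", "E", "SE", "S", "SW", "W", "NW"]
def INFANTRY_DIRS : List String := ["N", "NW", "W", "SW", "S", "SE", "E", "NE"]

def reorder_block (fr : List Int) (fromDirs toDirs : List String) (count : Int) : List Int :=
  let blocks := (PySem.List.pyRange 0 (fromDirs.length : Int) 1).map
      (fun i => PySem.List.slice fr (some (i * count)) (some ((i + 1) * count)))
  let dirMap := (PySem.List.enumerate fromDirs).foldl (fun d p => d.insert p.2 p.1) PySem.Dict.empty
  -- dir_map[d] / blocks[idx]: lookups always hit for the literal direction lists used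
  toDirs.foldl (fun reordered d =>
    reordered ++ (PySem.List.pyGet? blocks ((dirMap.get? d).getD 0)).getD []) []

-- Python `if xs: acc.extend(xs)` on an Option-valued block
def extendIfTruthy (ns : List Int) (ob : Option (List Int)) : List Int :=
  match ob with
  | some sb => if sb.isEmpty then ns else ns ++ sb
  | none => ns

-- Python `f(xs) if xs else None`
def mapIfTruthy (ob : Option (List Int)) (f : List Int → List Int) : Option (List Int) :=
  match ob with
  | some sb => if sb.isEmpty then none else some (f sb)
  | none => none

def VEHICLE_TO_INFANTRY_KEYS : List ((String × String) × String) :=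
  [(("StartWalkFrame", "WalkFrames"), "Walk"),
   (("StartStandFrame", "StandingFrames"), "Ready"),
   (("StartDeathFrame", "DeathFrames"), "Die1"),
   (("StartFiringFrame", "FiringFrames"), "FireUp"),
   (("StartIdleFrame", "IdleFrames"), "Idle1")]

def stepA (ini : PySem.Dict String String) (frames shadows : List Int)
    (st : PySem.Dict String String × List Int × List Int × Int)
    (item : (String × String) × String) : PySem.Dict String String × List Int × List Int × Int :=
  match st, item with
  | (d, nf, ns, idx), ((sk, ck), ik) =>
    if ((ini.get? sk).isSome && (ini.get? ck).isSome) = true then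
      -- int(...): ofStr?.getD is exact here, a ValueError input is excluded by Pre_
      let start := (PySem.Int.ofStr? ((ini.get? sk).getD "")).getD 0
      let count := (PySem.Int.ofStr? ((ini.get? ck).getD "")).getD 0
      if ck == "IdleFrames" then
        let block := ((PySem.List.pyRange 0 count 1).filter (fun j => decide (start + j < (frames.length : Int)))).map
            (fun j => (PySem.List.pyGet? frames (start + j)).getD 0)
        let shadow_block : Option (List Int) := if shadows.isEmpty then none else
            some ((PySem.List.pyRange 0 count 1).map (fun j => (PySem.List.pyGet? shadows (start + j)).getD 0))
        (d.insert ik (fmtEntry idx count), nf ++ block, extendIfTruthy ns shadow_block, idx + count)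
      else
        let block := extract_vehicle_block frames start count
        let shadow_block : Option (List Int) := if shadows.isEmpty then none else
            some (extract_vehicle_block shadows start count)
        if (ik == "Walk" || ik == "FireUp" || ik == "Ready") then
          let reordered := reorder_block block VEHICLE_DIRS INFANTRY_DIRS count
          let reordered_shadows := mapIfTruthy shadow_block
              (fun sb => reorder_block sb VEHICLE_DIRS INFANTRY_DIRS count)
          (d.insert ik (fmtEntry idx count), nf ++ reordered, extendIfTruthy ns reordered_shadows, idx + 8 * count)
        else
          let block2 := PySem.List.slice block none (some count)
          let shadow_block2 := mapIfTruthy shadow_block (fun sb => PySem.List.slice sb none (some count))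
          (d.insert ik (fmtEntry idx count), nf ++ block2, extendIfTruthy ns shadow_block2, idx + count)
    else (d, nf, ns, idx)

def convert_vehicle_to_infantry (ini_text : String) (frames : List Int) (shadows : List Int) : String × List Int × List Int :=
  let ini := parse_ini ini_text
  let fin := VEHICLE_TO_INFANTRY_KEYS.foldl (stepA ini frames shadows) (PySem.Dict.empty, [], [], 0)
  let lines := (["Walk", "Ready", "Die1", "FireUp", "Idle1"]).foldl (fun ls k =>
    match fin.1.get? k with
    | some v => ls ++ [k ++ "=" ++ v]
    | none => ls) []
  (PySem.Str.join "\n" lines, fin.2.1, fin.2.2.1)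

-- ===== PORT B =====

def lookupIni (lines : List String) (key : String) : Option String :=
  lines.foldl (fun val line =>
    match pvLineKV line with
    | some kv => if kv.1 == key then some kv.2 else val
    | none => val) none

-- for each infantry direction, the position of that direction's block in vehicle order
def PERM : List Int := [0, 7, 6, 5, 4, 3, 2, 1]

def SPECS : List (String × String × String × Bool) :=
  [("StartWalkFrame", "WalkFrames", "Walk", true),
   ("StartStandFrame", "StandingFrames", "Ready", true),
   ("StartDeathFrame", "DeathFrames", "Die1", false),
   ("StartFiringFrame", "FiringFrames", "FireUp", true),
   ("StartIdleFrame", "IdleFrames", "Idle1", false)]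

def stepB (lines : List String) (frames shadows : List Int)
    (st : List String × List Int × List Int × Int)
    (spec : String × String × String × Bool) : List String × List Int × List Int × Int :=
  match st, spec with
  | (ols, nf, ns, idx), (sk, ck, ik, directional) =>
    match lookupIni lines sk, lookupIni lines ck with
    | some sv, some cv =>
      -- int(...): ofStr?.getD is exact here, a ValueError input is excluded by Pre_
      let start := (PySem.Int.ofStr? sv).getD 0
      let count := (PySem.Int.ofStr? cv).getD 0
      let idxs := if directional then
          PERM.flatMap (fun p => (PySem.List.pyRange 0 count 1).map (fun j => start + p * count + j))
        else (PySem.List.pyRange 0 count 1).map (fun j => start + j)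
      let step := if directional then 8 * count else count
      let nf' := nf ++ (idxs.filter (fun i => decide (i < (frames.length : Int)))).map
          (fun i => (PySem.List.pyGet? frames i).getD 0)
      let ns' := if shadows.isEmpty then ns
        else ns ++ (idxs.filter (fun i => decide (i < (shadows.length : Int)))).map
            (fun i => (PySem.List.pyGet? shadows i).getD 0)
      (ols ++ [ik ++ "=" ++ fmtEntry idx count], nf', ns', idx + step)
    | _, _ => (ols, nf, ns, idx)

def convert_vehicle_to_infantry_alt (ini_text : String) (frames : List Int) (shadows : List Int) : String × List Int × List Int :=
  let lines := PySem.Str.splitlines ini_text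
  let fin := SPECS.foldl (stepB lines frames shadows) ([], [], [], 0)
  (PySem.Str.join "\n" fin.1, fin.2.1, fin.2.2.1)

-- ===== PRECONDITION & SPEC =====

-- Pre_ excludes exactly the inputs on which Python A raises: a present Start/Count value that
-- int() rejects (ValueError), or a parsed start so negative (or, for the unfiltered IdleFrames
-- shadow block, out of range) that an indexing step raises IndexError.
def preKey (lines : List String) (frames shadows : List Int) (sk ck : String) (idle : Bool) : Bool :=
  match lookupIni lines sk, lookupIni lines ck with
  | some sv, some cv =>
    match PySem.Int.ofStr? sv, PySem.Int.ofStr? cv with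
    | some s, some c =>
      (decide (c ≤ 0) || (decide (-(frames.length : Int) ≤ s) &&
        (shadows.isEmpty || decide (-(shadows.length : Int) ≤ s))))
      && (!idle || shadows.isEmpty || decide (c ≤ 0) ||
        (decide (-(shadows.length : Int) ≤ s) && decide (s + c ≤ (shadows.length : Int))))
    | _, _ => false
  | _, _ => true

def Pre_convert_vehicle_to_infantry (ini_text : String) (frames : List Int) (shadows : List Int) : Prop :=
  (preKey (PySem.Str.splitlines ini_text) frames shadows "StartWalkFrame" "WalkFrames" false
   && preKey (PySem.Str.splitlines ini_text) frames shadows "StartStandFrame" "StandingFrames" false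
   && preKey (PySem.Str.splitlines ini_text) frames shadows "StartDeathFrame" "DeathFrames" false
   && preKey (PySem.Str.splitlines ini_text) frames shadows "StartFiringFrame" "FiringFrames" false
   && preKey (PySem.Str.splitlines ini_text) frames shadows "StartIdleFrame" "IdleFrames" true) = true

instance (ini_text : String) (frames : List Int) (shadows : List Int) : Decidable (Pre_convert_vehicle_to_infantry ini_text frames shadows) := by
  unfold Pre_convert_vehicle_to_infantry; infer_instance

def pvWitness_convert_vehicle_to_infantry : String × List Int × List Int :=
  ("StartWalkFrame=0\nWalkFrames=1\nStartDeathFrame=2\nDeathFrames=1", [1, 2, 3, 4, 5, 6, 7, 8, 9, 10], [])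

def Spec_convert_vehicle_to_infantry (ini_text : String) (frames : List Int) (shadows : List Int) (out : String × List Int × List Int) : Prop := out = convert_vehicle_to_infantry_alt ini_text frames shadows
instance (ini_text : String) (frames : List Int) (shadows : List Int) (out : String × List Int × List Int) : Decidable (Spec_convert_vehicle_to_infantry ini_text frames shadows out) := by unfold Spec_convert_vehicle_to_infantry; infer_instance

-- ===== CLAIM (what is proved, stated in full; the proofs are below) =====
def Claim_equal_convert_vehicle_to_infantry : Prop := ∀ (ini_text : String) (frames : List Int) (shadows : List Int), Dom_convert_vehicle_to_infantry ini_text frames shadows → Pre_convert_vehicle_to_infantry ini_text frames shadows → Spec_convert_vehicle_to_infantry ini_text frames shadows (convert_vehicle_to_infantry ini_text frames shadows)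

-- ===== LEMMAS AND PROOFS =====

lemma filter_pyRange_lt (L : Int) : ∀ (n : Nat) (a b : Int), (b - a).toNat ≤ n →
    (PySem.List.pyRange a b 1).filter (fun x => decide (x < L))
      = PySem.List.pyRange a (max a (min b L)) 1 := by
  intro n
  induction n with
  | zero =>
    intro a b h
    rw [PySem.List.pyRange_one_eq_nil (by omega), PySem.List.pyRange_one_eq_nil (by omega)]
    rfl
  | succ n ih =>
    intro a b h
    by_cases hab : b ≤ a
    · rw [PySem.List.pyRange_one_eq_nil hab, PySem.List.pyRange_one_eq_nil (by omega)]
      rfl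
    · push_neg at hab
      rw [PySem.List.pyRange_one_cons hab, List.filter_cons]
      by_cases haL : a < L
      · simp only [haL, decide_true, if_true]
        rw [ih (a + 1) b (by omega)]
        rw [PySem.List.pyRange_one_cons (show a < max a (min b L) by omega)]
        congr 1
        apply congrArg (fun x => PySem.List.pyRange (a+1) x 1)
        omega
      · rw [if_neg (by simp [haL])]
        rw [ih (a + 1) b (by omega)]
        rw [PySem.List.pyRange_one_eq_nil (by omega), PySem.List.pyRange_one_eq_nil (by omega)]

lemma filter_lt (L a b : Int) :
    (PySem.List.pyRange a b 1).filter (fun x => decide (x < L))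
      = PySem.List.pyRange a (max a (min b L)) 1 :=
  filter_pyRange_lt L (b - a).toNat a b le_rfl

lemma drop_pyRange : ∀ (n : Nat) (a b : Int), (PySem.List.pyRange a b 1).drop n = PySem.List.pyRange (a + n) b 1 := by
  intro n
  induction n with
  | zero => intro a b; simp
  | succ n ih =>
    intro a b
    by_cases hab : b ≤ a
    · rw [PySem.List.pyRange_one_eq_nil hab, PySem.List.pyRange_one_eq_nil (by omega)]
      simp
    · push_neg at hab
      rw [PySem.List.pyRange_one_cons hab, List.drop_succ_cons, ih (a+1) b]
      apply congrArg (fun x => PySem.List.pyRange x b 1)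
      push_cast; ring

lemma take_pyRange : ∀ (n : Nat) (a b : Int), (PySem.List.pyRange a b 1).take n = PySem.List.pyRange a (min b (a + n)) 1 := by
  intro n
  induction n with
  | zero => intro a b; rw [List.take_zero, PySem.List.pyRange_one_eq_nil (by omega)]
  | succ n ih =>
    intro a b
    by_cases hab : b ≤ a
    · rw [PySem.List.pyRange_one_eq_nil hab, PySem.List.pyRange_one_eq_nil (by omega)]
      simp
    · push_neg at hab
      have hcast : (((n + 1 : Nat)) : Int) = (n : Int) + 1 := by push_cast; ring
      rw [PySem.List.pyRange_one_cons hab, List.take_succ_cons, ih (a+1) b, hcast]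
      rw [PySem.List.pyRange_one_cons (show a < min b (a + ((n:Int)+1)) by omega)]
      congr 1
      apply congrArg (fun x => PySem.List.pyRange (a+1) x 1)
      omega

-- gather frames[i] for i in [a, b)
def gat (xs : List Int) (a b : Int) : List Int :=
  (PySem.List.pyRange a b 1).map (fun i => (PySem.List.pyGet? xs i).getD 0)

lemma pyRange_congr (a : Int) {b b' : Int} (h : b = b' ∨ (b ≤ a ∧ b' ≤ a)) :
    PySem.List.pyRange a b 1 = PySem.List.pyRange a b' 1 := by
  rcases h with h | ⟨h1, h2⟩
  · rw [h]
  · rw [PySem.List.pyRange_one_eq_nil h1, PySem.List.pyRange_one_eq_nil h2]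

lemma gat_congr (xs : List Int) (a : Int) {b b' : Int} (h : b = b' ∨ (b ≤ a ∧ b' ≤ a)) :
    gat xs a b = gat xs a b' := by
  unfold gat; rw [pyRange_congr a h]

lemma gat_glue (xs : List Int) (a b c' L : Int) (h1 : a ≤ b) (h2 : b ≤ c') :
    gat xs a (max a (min b L)) ++ gat xs b (max b (min c' L)) = gat xs a (max a (min c' L)) := by
  by_cases hbL : b ≤ L
  · rw [gat_congr xs a (b := max a (min b L)) (Or.inl (show max a (min b L) = b by omega))]
    rw [gat_congr xs a (b := max a (min c' L)) (Or.inl (show max a (min c' L) = max b (min c' L) by omega))]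
    unfold gat
    rw [← List.map_append]
    congr 1
    exact (PySem.List.pyRange_one_append a b (max b (min c' L)) h1 (by omega)).symm
  · by_cases haL : L ≤ a
    · rw [gat_congr xs a (b := max a (min b L)) (Or.inr (by omega)) (b' := a),
          gat_congr xs b (b := max b (min c' L)) (Or.inr (by omega)) (b' := b),
          gat_congr xs a (b := max a (min c' L)) (Or.inr (by omega)) (b' := a)]
      unfold gat
      rw [PySem.List.pyRange_one_eq_nil (by omega), PySem.List.pyRange_one_eq_nil (by omega)]
      simp
    · rw [gat_congr xs b (b := max b (min c' L)) (Or.inr (by omega)) (b' := b)]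
      rw [gat_congr xs a (b := max a (min c' L)) (Or.inl (show max a (min c' L) = max a (min b L) by omega))]
      unfold gat
      rw [PySem.List.pyRange_one_eq_nil (le_refl b)]
      simp

lemma shift_filter_map (c a : Int) (Q : Int → Bool) (F : Int → Int) :
    ((PySem.List.pyRange 0 c 1).filter (fun j => Q (a + j))).map (fun j => F (a + j))
      = ((PySem.List.pyRange a (a + c) 1).filter Q).map F := by
  rw [PySem.List.pyRange_one 0 c, PySem.List.pyRange_one a (a + c)]
  rw [List.filter_map, List.filter_map, List.map_map, List.map_map]
  have : (a + c - a).toNat = (c - 0).toNat := by omega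
  rw [this]
  simp [Function.comp_def]

lemma shift_map (c a : Int) (F : Int → Int) :
    (PySem.List.pyRange 0 c 1).map (fun j => F (a + j))
      = (PySem.List.pyRange a (a + c) 1).map F := by
  rw [PySem.List.pyRange_one 0 c, PySem.List.pyRange_one a (a + c)]
  rw [List.map_map, List.map_map]
  have : (a + c - a).toNat = (c - 0).toNat := by omega
  rw [this]
  simp [Function.comp_def]

lemma chunk_eq (xs : List Int) (a c : Int) :
    (((PySem.List.pyRange 0 c 1).map (fun j => a + j)).filter
        (fun i => decide (i < (xs.length : Int)))).map (fun i => (PySem.List.pyGet? xs i).getD 0)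
      = gat xs a (max a (min (a + c) (xs.length : Int))) := by
  rw [List.filter_map, List.map_map]
  have h := shift_filter_map c a (fun i => decide (i < (xs.length : Int)))
      (fun i => (PySem.List.pyGet? xs i).getD 0)
  simp only [Function.comp_def] at h ⊢
  rw [h, filter_lt (xs.length : Int) a (a + c)]
  rfl

lemma flatK (xs : List Int) (s c : Int) (hc : 0 ≤ c) :
    ∀ (K : Int) (hK : 0 ≤ K),
    (PySem.List.pyRange 0 K 1).flatMap
        (fun i => gat xs (s + i * c) (max (s + i * c) (min (s + i * c + c) (xs.length : Int))))
      = gat xs s (max s (min (s + K * c) (xs.length : Int))) := by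
  intro K hK
  induction K, hK using Int.le_induction with
  | base =>
    rw [PySem.List.pyRange_one_eq_nil (le_refl 0)]
    rw [gat_congr xs s (Or.inr (by omega)) (b' := s), gat]
    rw [PySem.List.pyRange_one_eq_nil (le_refl s)]
    rfl
  | succ K hK ih =>
    rw [PySem.List.pyRange_one_succ_right hK, List.flatMap_append, List.flatMap_singleton, ih]
    have hKc : 0 ≤ K * c := mul_nonneg hK hc
    have := gat_glue xs s (s + K * c) (s + K * c + c) (xs.length : Int) (by omega) (by omega)
    rw [this]
    apply gat_congr
    left
    have : (K + 1) * c = K * c + c := by ring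
    omega

lemma extract_eq (xs : List Int) (s c : Int) :
    extract_vehicle_block xs s c = gat xs s (max s (min (s + 8 * c) (xs.length : Int))) := by
  by_cases hc : 0 ≤ c
  · unfold extract_vehicle_block
    rw [PySem.List.foldl_congr_mem _ _
      (fun (block : List Int) (i : Int) =>
        block ++ gat xs (s + i * c) (max (s + i * c) (min (s + i * c + c) (xs.length : Int)))) _ ?_]
    · rw [PySem.List.foldl_append_eq_flatMap]
      rw [flatK xs s c hc 8 (by omega)]
      simp
    · intro acc i _
      have h := PySem.List.foldl_append_if
        (fun j => decide (s + i * c + j < (xs.length : Int)))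
        (fun j => (PySem.List.pyGet? xs (s + i * c + j)).getD 0)
        (PySem.List.pyRange 0 c 1) acc
      simp only [decide_eq_true_eq] at h
      rw [h]
      congr 1
      have h2 := shift_filter_map c (s + i * c) (fun t => decide (t < (xs.length : Int)))
        (fun t => (PySem.List.pyGet? xs t).getD 0)
      simp only at h2
      rw [h2, filter_lt]
      rfl
  · push_neg at hc
    have h0 : PySem.List.pyRange 0 c 1 = [] := PySem.List.pyRange_one_eq_nil (by omega)
    unfold extract_vehicle_block
    rw [gat_congr xs s (Or.inr (by omega)) (b' := s), gat,
        PySem.List.pyRange_one_eq_nil (le_refl s)]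
    simp [h0]

lemma slice_nil' (a b : Option Int) : PySem.List.slice ([] : List Int) a b = [] := by
  simp [PySem.List.slice]

lemma slice_gat_P (xs : List Int) (s c P : Int) (hc : 0 ≤ c) (hP0 : 0 ≤ P) (hP7 : P ≤ 7) :
    PySem.List.slice (gat xs s (max s (min (s + 8 * c) (xs.length : Int))))
        (some (P * c)) (some ((P + 1) * c))
      = gat xs (s + P * c) (max (s + P * c) (min (s + P * c + c) (xs.length : Int))) := by
  have hu0 : 0 ≤ P * c := mul_nonneg hP0 hc
  have hu8 : P * c + c ≤ 8 * c := by nlinarith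
  have h1 : P * c = ((P * c).toNat : Int) := (Int.toNat_of_nonneg hu0).symm
  have h2 : (P + 1) * c = ((P * c).toNat : Int) + (c.toNat : Int) := by
    rw [Int.toNat_of_nonneg hu0, Int.toNat_of_nonneg hc]; ring
  rw [h1, h2, PySem.List.slice_natCast_add]
  unfold gat
  rw [← List.map_drop, ← List.map_take, drop_pyRange, take_pyRange]
  apply congrArg
  rw [← h1]
  apply pyRange_congr
  rw [Int.toNat_of_nonneg hc]
  generalize hK : P * c = K at *
  omega

def S (fr : List Int) (c : Int) (p : Int) : List Int :=
  PySem.List.slice fr (some (p * c)) (some ((p + 1) * c))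

lemma reorder_expand (fr : List Int) (c : Int) :
    reorder_block fr VEHICLE_DIRS INFANTRY_DIRS c =
      [] ++ S fr c 0 ++ S fr c 7 ++ S fr c 6 ++ S fr c 5 ++ S fr c 4 ++ S fr c 3 ++ S fr c 2 ++ S fr c 1 := rfl

lemma reorder_nil (c : Int) : reorder_block [] VEHICLE_DIRS INFANTRY_DIRS c = [] := by
  rw [reorder_expand]
  simp [S, slice_nil']

-- the canonical per-direction segment
def GG (xs : List Int) (c a : Int) : List Int := gat xs a (max a (min (a + c) (xs.length : Int)))

lemma GG_nil (xs : List Int) {c : Int} (a : Int) (hc : c < 0) : GG xs c a = [] := by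
  unfold GG gat
  rw [PySem.List.pyRange_one_eq_nil (by omega)]
  rfl

lemma dirA (xs : List Int) (s c : Int) :
    reorder_block (extract_vehicle_block xs s c) VEHICLE_DIRS INFANTRY_DIRS c
      = GG xs c (s + 0 * c) ++ (GG xs c (s + 7 * c) ++ (GG xs c (s + 6 * c) ++ (GG xs c (s + 5 * c) ++
          (GG xs c (s + 4 * c) ++ (GG xs c (s + 3 * c) ++ (GG xs c (s + 2 * c) ++ GG xs c (s + 1 * c))))))) := by
  by_cases hc : 0 ≤ c
  · rw [extract_eq, reorder_expand]
    unfold S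
    rw [slice_gat_P xs s c 0 hc (by norm_num) (by norm_num),
        slice_gat_P xs s c 1 hc (by norm_num) (by norm_num),
        slice_gat_P xs s c 2 hc (by norm_num) (by norm_num),
        slice_gat_P xs s c 3 hc (by norm_num) (by norm_num),
        slice_gat_P xs s c 4 hc (by norm_num) (by norm_num),
        slice_gat_P xs s c 5 hc (by norm_num) (by norm_num),
        slice_gat_P xs s c 6 hc (by norm_num) (by norm_num),
        slice_gat_P xs s c 7 hc (by norm_num) (by norm_num)]
    simp [GG, List.append_assoc]
  · push_neg at hc
    have hx : extract_vehicle_block xs s c = [] := by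
      rw [extract_eq]
      unfold gat
      rw [PySem.List.pyRange_one_eq_nil (by omega)]
      rfl
    rw [hx, reorder_nil]
    simp [GG_nil xs _ hc]

lemma dirB (xs : List Int) (s c : Int) :
    ((PERM.flatMap (fun p => (PySem.List.pyRange 0 c 1).map (fun j => s + p * c + j))).filter
        (fun i => decide (i < (xs.length : Int)))).map (fun i => (PySem.List.pyGet? xs i).getD 0)
      = GG xs c (s + 0 * c) ++ (GG xs c (s + 7 * c) ++ (GG xs c (s + 6 * c) ++ (GG xs c (s + 5 * c) ++
          (GG xs c (s + 4 * c) ++ (GG xs c (s + 3 * c) ++ (GG xs c (s + 2 * c) ++ GG xs c (s + 1 * c))))))) := by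
  simp only [PERM, List.flatMap_cons, List.flatMap_nil, List.append_nil,
    List.filter_append, List.map_append, chunk_eq]
  rfl

lemma firstA (xs : List Int) (s c : Int) :
    PySem.List.slice (extract_vehicle_block xs s c) none (some c) = GG xs c s := by
  by_cases hc : 0 ≤ c
  · rw [extract_eq, PySem.List.slice_to _ hc]
    unfold GG gat
    rw [← List.map_take, take_pyRange]
    apply congrArg
    apply pyRange_congr
    omega
  · push_neg at hc
    have hx : extract_vehicle_block xs s c = [] := by
      rw [extract_eq]
      unfold gat
      rw [PySem.List.pyRange_one_eq_nil (by omega)]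
      rfl
    rw [hx, slice_nil', GG_nil xs s hc]

lemma idleA (xs : List Int) (s c : Int) :
    ((PySem.List.pyRange 0 c 1).filter (fun j => decide (s + j < (xs.length : Int)))).map
        (fun j => (PySem.List.pyGet? xs (s + j)).getD 0)
      = GG xs c s := by
  have h2 := shift_filter_map c s (fun t => decide (t < (xs.length : Int)))
    (fun t => (PySem.List.pyGet? xs t).getD 0)
  simp only at h2
  rw [h2, filter_lt]
  rfl

-- under the Pre_ bound, B's filtered idle-shadow gather equals A's unfiltered one
lemma idleB_shadow (xs : List Int) (s c : Int) (h : c ≤ 0 ∨ s + c ≤ (xs.length : Int)) :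
    (((PySem.List.pyRange 0 c 1).map (fun j => s + j)).filter
        (fun i => decide (i < (xs.length : Int)))).map (fun i => (PySem.List.pyGet? xs i).getD 0)
      = (PySem.List.pyRange 0 c 1).map (fun j => (PySem.List.pyGet? xs (s + j)).getD 0) := by
  rw [chunk_eq]
  have hA : (PySem.List.pyRange 0 c 1).map (fun j => (PySem.List.pyGet? xs (s + j)).getD 0)
      = gat xs s (s + c) := by
    unfold gat
    exact shift_map c s (fun t => (PySem.List.pyGet? xs t).getD 0)
  rw [hA]
  apply gat_congr
  rcases h with h | h
  · right; omega
  · by_cases hc : 0 ≤ c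
    · left; omega
    · right; omega

lemma lkv_gen (k : String) : ∀ (ls : List String) (d : PySem.Dict String String) (acc : Option String),
    d.get? k = acc →
    (ls.foldl (fun d line => match pvLineKV line with
      | some kv => d.insert kv.1 kv.2
      | none => d) d).get? k
      = ls.foldl (fun val line => match pvLineKV line with
      | some kv => if kv.1 == k then some kv.2 else val
      | none => val) acc := by
  intro ls
  induction ls with
  | nil => intro d acc h; simpa using h
  | cons line rest ih =>
    intro d acc h
    simp only [List.foldl_cons]
    cases hkv : pvLineKV line with
    | none => exact ih d acc h
    | some kv =>
      apply ih
      by_cases hk : kv.1 = k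
      · subst hk; rw [PySem.Dict.get?_insert_self]; simp
      · rw [PySem.Dict.get?_insert_of_ne d kv.2 (fun hh => hk hh.symm)]
        simp [hk, h]

lemma lkv (t : String) (k : String) :
    (parse_ini t).get? k = lookupIni (PySem.Str.splitlines t) k := by
  unfold parse_ini lookupIni
  apply lkv_gen
  simp [PySem.Dict.get?, PySem.Dict.empty]

def lineOf (kv : String × String) : String := kv.1 ++ "=" ++ kv.2

lemma render_fold : ∀ (ks : List String) (its : List (String × String)) (acc : List String),
    ks.Nodup → List.Sublist (its.map Prod.fst) ks →
    ks.foldl (fun ls k =>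
      match Option.map (fun x => x.2) (List.find? (fun p => p.1 == k) its) with
      | some v => ls ++ [k ++ "=" ++ v]
      | none => ls) acc = acc ++ its.map lineOf := by
  intro ks
  induction ks with
  | nil =>
    intro its acc _ hsub
    rw [List.sublist_nil.mp hsub |> List.map_eq_nil_iff.mp]
    simp
  | cons k ks ih =>
    intro its acc hnd hsub
    have hk_not : k ∉ ks := (List.nodup_cons.mp hnd).1
    have hnd' := (List.nodup_cons.mp hnd).2
    cases its with
    | nil =>
      simp only [List.foldl_cons, List.find?_nil, Option.map_none]
      have := ih [] acc hnd' (List.nil_sublist ks)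
      simpa using this
    | cons kv rest =>
      obtain ⟨k0, v0⟩ := kv
      rw [List.map_cons] at hsub
      cases hsub with
      | cons _ h =>
        have hnone : List.find? (fun p => p.1 == k) ((k0, v0) :: rest) = none := by
          rw [List.find?_eq_none]
          intro p hp
          have hmem : p.1 ∈ ks := h.subset (List.mem_map_of_mem hp)
          simp only [beq_iff_eq]
          exact fun he => hk_not (he ▸ hmem)
        simp only [List.foldl_cons, hnone, Option.map_none]
        exact ih ((k0, v0) :: rest) acc hnd' (by simpa using h)
      | cons₂ _ h =>
        simp only [List.foldl_cons, List.find?_cons, beq_self_eq_true, if_pos]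
        rw [PySem.List.foldl_congr_mem ks _ (fun ls k' =>
          match Option.map (fun x => x.2) (List.find? (fun p => p.1 == k') rest) with
          | some v => ls ++ [k' ++ "=" ++ v]
          | none => ls) _ ?_]
        · rw [ih rest _ hnd' h]
          simp [lineOf]
        · intro acc' x hx
          have hne : (k0 == x) = false := by
            simp only [beq_eq_false_iff_ne]
            exact fun he => hk_not (he ▸ hx)
          simp [List.find?_cons, hne]

lemma contains_false_of (d : PySem.Dict String String) {P : List String}
    (hsub : List.Sublist (d.items.map Prod.fst) P) {ik : String} (hik : ik ∉ P) :
    d.contains ik = false := by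
  unfold PySem.Dict.contains
  rw [List.any_eq_false]
  intro p hp
  simp only [beq_iff_eq]
  exact fun he => hik (he ▸ hsub.subset (List.mem_map_of_mem hp))

lemma items_insert_fresh (d : PySem.Dict String String) (k : String) (v : String)
    (h : d.contains k = false) : (d.insert k v).items = d.items ++ [(k, v)] := by
  unfold PySem.Dict.insert
  rw [h]
  simp

lemma extend_some (ns M : List Int) : extendIfTruthy ns (some M) = ns ++ M := by
  cases M <;> simp [extendIfTruthy]

lemma ext_map_truthy (ns E : List Int) (f : List Int → List Int) (hf : f [] = []) :
    extendIfTruthy ns (mapIfTruthy (some E) f) = ns ++ f E := by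
  cases E with
  | nil => simp [mapIfTruthy, extendIfTruthy, hf]
  | cons a t =>
    simp only [mapIfTruthy, List.isEmpty_cons, Bool.false_eq_true, if_false]
    exact extend_some ns _

lemma step_dir (ini : PySem.Dict String String) (lines : List String) (frames shadows : List Int)
    (hrel : ∀ k, ini.get? k = lookupIni lines k)
    (stA : PySem.Dict String String × List Int × List Int × Int)
    (stB : List String × List Int × List Int × Int)
    (sk ck ik : String) (P : List String)
    (hck : (ck == "IdleFrames") = false)
    (hik : (ik == "Walk" || ik == "FireUp" || ik == "Ready") = true)
    (h1 : stA.1.items.map lineOf = stB.1)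
    (hkeys : List.Sublist (stA.1.items.map Prod.fst) P) (hfresh : ik ∉ P)
    (h2 : stA.2.1 = stB.2.1) (h3 : stA.2.2.1 = stB.2.2.1) (h4 : stA.2.2.2 = stB.2.2.2) :
    (stepA ini frames shadows stA ((sk, ck), ik)).1.items.map lineOf
        = (stepB lines frames shadows stB (sk, ck, ik, true)).1
      ∧ List.Sublist ((stepA ini frames shadows stA ((sk, ck), ik)).1.items.map Prod.fst) (P ++ [ik])
      ∧ (stepA ini frames shadows stA ((sk, ck), ik)).2.1 = (stepB lines frames shadows stB (sk, ck, ik, true)).2.1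
      ∧ (stepA ini frames shadows stA ((sk, ck), ik)).2.2.1 = (stepB lines frames shadows stB (sk, ck, ik, true)).2.2.1
      ∧ (stepA ini frames shadows stA ((sk, ck), ik)).2.2.2 = (stepB lines frames shadows stB (sk, ck, ik, true)).2.2.2 := by
  obtain ⟨d, nf, ns, idx⟩ := stA
  obtain ⟨ols, nfB, nsB, idxB⟩ := stB
  replace h1 : d.items.map lineOf = ols := h1
  replace h2 : nf = nfB := h2
  replace h3 : ns = nsB := h3
  replace h4 : idx = idxB := h4
  subst h2 h3 h4
  cases hsv : lookupIni lines sk with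
  | none =>
    simp only [stepA, stepB, hrel, hsv, Option.isSome_none, Bool.false_and,
      Bool.false_eq_true, if_false]
    exact ⟨h1, hkeys.trans (List.sublist_append_left P [ik]), by trivial, by trivial, by trivial⟩
  | some sv =>
    cases hcv : lookupIni lines ck with
    | none =>
      simp only [stepA, stepB, hrel, hsv, hcv, Option.isSome_none, Option.isSome_some,
        Bool.true_and, Bool.false_eq_true, if_false]
      exact ⟨h1, hkeys.trans (List.sublist_append_left P [ik]), by trivial, by trivial, by trivial⟩
    | some cv =>
      have hfreshd : d.contains ik = false := contains_false_of d hkeys hfresh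
      simp only [stepA, stepB, hrel, hsv, hcv, Option.isSome_some, Bool.and_self, if_true,
        Option.getD_some, hck, Bool.false_eq_true, if_false, hik, if_true]
      refine ⟨?_, ?_, ?_, ?_, by trivial⟩
      · rw [items_insert_fresh d ik _ hfreshd, List.map_append, h1]
        simp [lineOf]
      · rw [items_insert_fresh d ik _ hfreshd, List.map_append]
        exact List.Sublist.append hkeys (List.Sublist.refl [ik])
      · rw [dirA, dirB]
      · by_cases hsh : shadows.isEmpty
        · simp [hsh, mapIfTruthy, extendIfTruthy]
        · simp only [hsh, Bool.false_eq_true, if_false]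
          rw [ext_map_truthy ns _ _ (reorder_nil _), dirA, dirB]

lemma step_first (ini : PySem.Dict String String) (lines : List String) (frames shadows : List Int)
    (hrel : ∀ k, ini.get? k = lookupIni lines k)
    (stA : PySem.Dict String String × List Int × List Int × Int)
    (stB : List String × List Int × List Int × Int)
    (sk ck ik : String) (P : List String)
    (hck : (ck == "IdleFrames") = false)
    (hik : (ik == "Walk" || ik == "FireUp" || ik == "Ready") = false)
    (h1 : stA.1.items.map lineOf = stB.1)
    (hkeys : List.Sublist (stA.1.items.map Prod.fst) P) (hfresh : ik ∉ P)
    (h2 : stA.2.1 = stB.2.1) (h3 : stA.2.2.1 = stB.2.2.1) (h4 : stA.2.2.2 = stB.2.2.2) :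
    (stepA ini frames shadows stA ((sk, ck), ik)).1.items.map lineOf
        = (stepB lines frames shadows stB (sk, ck, ik, false)).1
      ∧ List.Sublist ((stepA ini frames shadows stA ((sk, ck), ik)).1.items.map Prod.fst) (P ++ [ik])
      ∧ (stepA ini frames shadows stA ((sk, ck), ik)).2.1 = (stepB lines frames shadows stB (sk, ck, ik, false)).2.1
      ∧ (stepA ini frames shadows stA ((sk, ck), ik)).2.2.1 = (stepB lines frames shadows stB (sk, ck, ik, false)).2.2.1
      ∧ (stepA ini frames shadows stA ((sk, ck), ik)).2.2.2 = (stepB lines frames shadows stB (sk, ck, ik, false)).2.2.2 := by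
  obtain ⟨d, nf, ns, idx⟩ := stA
  obtain ⟨ols, nfB, nsB, idxB⟩ := stB
  replace h1 : d.items.map lineOf = ols := h1
  replace h2 : nf = nfB := h2
  replace h3 : ns = nsB := h3
  replace h4 : idx = idxB := h4
  subst h2 h3 h4
  cases hsv : lookupIni lines sk with
  | none =>
    simp only [stepA, stepB, hrel, hsv, Option.isSome_none, Bool.false_and,
      Bool.false_eq_true, if_false]
    exact ⟨h1, hkeys.trans (List.sublist_append_left P [ik]), by trivial, by trivial, by trivial⟩
  | some sv =>
    cases hcv : lookupIni lines ck with
    | none =>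
      simp only [stepA, stepB, hrel, hsv, hcv, Option.isSome_none, Option.isSome_some,
        Bool.true_and, Bool.false_eq_true, if_false]
      exact ⟨h1, hkeys.trans (List.sublist_append_left P [ik]), by trivial, by trivial, by trivial⟩
    | some cv =>
      have hfreshd : d.contains ik = false := contains_false_of d hkeys hfresh
      simp only [stepA, stepB, hrel, hsv, hcv, Option.isSome_some, Bool.and_self, if_true,
        Option.getD_some, hck, hik, Bool.false_eq_true, if_false]
      refine ⟨?_, ?_, ?_, ?_, by trivial⟩
      · rw [items_insert_fresh d ik _ hfreshd, List.map_append, h1]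
        simp [lineOf]
      · rw [items_insert_fresh d ik _ hfreshd, List.map_append]
        exact List.Sublist.append hkeys (List.Sublist.refl [ik])
      · rw [firstA, chunk_eq]
        rfl
      · by_cases hsh : shadows.isEmpty
        · simp [hsh, mapIfTruthy, extendIfTruthy]
        · simp only [hsh, Bool.false_eq_true, if_false]
          rw [ext_map_truthy ns _ _ (slice_nil' _ _), firstA, chunk_eq]
          rfl

lemma step_idle (ini : PySem.Dict String String) (lines : List String) (frames shadows : List Int)
    (hrel : ∀ k, ini.get? k = lookupIni lines k)
    (stA : PySem.Dict String String × List Int × List Int × Int)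
    (stB : List String × List Int × List Int × Int)
    (sk ik : String) (P : List String)
    (hpre : preKey lines frames shadows sk "IdleFrames" true = true)
    (h1 : stA.1.items.map lineOf = stB.1)
    (hkeys : List.Sublist (stA.1.items.map Prod.fst) P) (hfresh : ik ∉ P)
    (h2 : stA.2.1 = stB.2.1) (h3 : stA.2.2.1 = stB.2.2.1) (h4 : stA.2.2.2 = stB.2.2.2) :
    (stepA ini frames shadows stA ((sk, "IdleFrames"), ik)).1.items.map lineOf
        = (stepB lines frames shadows stB (sk, "IdleFrames", ik, false)).1
      ∧ List.Sublist ((stepA ini frames shadows stA ((sk, "IdleFrames"), ik)).1.items.map Prod.fst) (P ++ [ik])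
      ∧ (stepA ini frames shadows stA ((sk, "IdleFrames"), ik)).2.1 = (stepB lines frames shadows stB (sk, "IdleFrames", ik, false)).2.1
      ∧ (stepA ini frames shadows stA ((sk, "IdleFrames"), ik)).2.2.1 = (stepB lines frames shadows stB (sk, "IdleFrames", ik, false)).2.2.1
      ∧ (stepA ini frames shadows stA ((sk, "IdleFrames"), ik)).2.2.2 = (stepB lines frames shadows stB (sk, "IdleFrames", ik, false)).2.2.2 := by
  obtain ⟨d, nf, ns, idx⟩ := stA
  obtain ⟨ols, nfB, nsB, idxB⟩ := stB
  replace h1 : d.items.map lineOf = ols := h1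
  replace h2 : nf = nfB := h2
  replace h3 : ns = nsB := h3
  replace h4 : idx = idxB := h4
  subst h2 h3 h4
  cases hsv : lookupIni lines sk with
  | none =>
    simp only [stepA, stepB, hrel, hsv, Option.isSome_none, Bool.false_and,
      Bool.false_eq_true, if_false]
    exact ⟨h1, hkeys.trans (List.sublist_append_left P [ik]), by trivial, by trivial, by trivial⟩
  | some sv =>
    cases hcv : lookupIni lines "IdleFrames" with
    | none =>
      simp only [stepA, stepB, hrel, hsv, hcv, Option.isSome_none, Option.isSome_some,
        Bool.true_and, Bool.false_eq_true, if_false]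
      exact ⟨h1, hkeys.trans (List.sublist_append_left P [ik]), by trivial, by trivial, by trivial⟩
    | some cv =>
      cases hos : PySem.Int.ofStr? sv with
      | none => simp [preKey, hsv, hcv, hos] at hpre
      | some s =>
      cases hoc : PySem.Int.ofStr? cv with
      | none => simp [preKey, hsv, hcv, hos, hoc] at hpre
      | some c =>
      simp only [preKey, hsv, hcv, hos, hoc] at hpre
      have hfreshd : d.contains ik = false := contains_false_of d hkeys hfresh
      simp only [stepA, stepB, hrel, hsv, hcv, Option.isSome_some, Bool.and_self, if_true,
        Option.getD_some, beq_self_eq_true, hos, hoc]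
      simp only [if_true, Bool.false_eq_true, if_false]
      refine ⟨?_, ?_, ?_, ?_, by trivial⟩
      · rw [items_insert_fresh d ik _ hfreshd, List.map_append, h1]
        simp [lineOf]
      · rw [items_insert_fresh d ik _ hfreshd, List.map_append]
        exact List.Sublist.append hkeys (List.Sublist.refl [ik])
      · rw [idleA, chunk_eq]
        rfl
      · by_cases hsh : shadows.isEmpty
        · simp [hsh, extendIfTruthy]
        · simp only [hsh, Bool.false_eq_true, if_false]
          rw [extend_some]
          have hcond : c ≤ 0 ∨ s + c ≤ (shadows.length : Int) := by
            rw [Bool.and_eq_true] at hpre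
            have h2 := hpre.2
            simp only [hsh, Bool.not_true, Bool.false_or, Bool.or_eq_true,
              Bool.and_eq_true, decide_eq_true_eq, Bool.false_eq_true, false_or] at h2
            rcases h2 with h | h
            · exact Or.inl h
            · exact Or.inr h.2
          rw [idleB_shadow shadows s c hcond]

-- ===== VERDICT (by name: the statement is the Claim_ definition above) =====
theorem convert_vehicle_to_infantry_spec : Claim_equal_convert_vehicle_to_infantry := by
  intro ini_text frames shadows _hdom hpre
  unfold Spec_convert_vehicle_to_infantry
  have hrel : ∀ k, (parse_ini ini_text).get? k = lookupIni (PySem.Str.splitlines ini_text) k :=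
    fun k => lkv ini_text k
  unfold Pre_convert_vehicle_to_infantry at hpre
  simp only [Bool.and_eq_true] at hpre
  simp only [convert_vehicle_to_infantry, convert_vehicle_to_infantry_alt,
    VEHICLE_TO_INFANTRY_KEYS, SPECS, List.foldl_cons, List.foldl_nil]
  have H1 := step_dir (parse_ini ini_text) (PySem.Str.splitlines ini_text) frames shadows hrel
    (PySem.Dict.empty, [], [], 0) ([], [], [], 0) "StartWalkFrame" "WalkFrames" "Walk" []
    (by decide) (by decide) (by rfl) (by simp [PySem.Dict.empty]) (by simp) rfl rfl rfl
  have H2 := step_dir (parse_ini ini_text) (PySem.Str.splitlines ini_text) frames shadows hrel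
    _ _ "StartStandFrame" "StandingFrames" "Ready" ([] ++ ["Walk"])
    (by decide) (by decide) H1.1 H1.2.1 (by decide) H1.2.2.1 H1.2.2.2.1 H1.2.2.2.2
  have H3 := step_first (parse_ini ini_text) (PySem.Str.splitlines ini_text) frames shadows hrel
    _ _ "StartDeathFrame" "DeathFrames" "Die1" ([] ++ ["Walk"] ++ ["Ready"])
    (by decide) (by decide) H2.1 H2.2.1 (by decide) H2.2.2.1 H2.2.2.2.1 H2.2.2.2.2
  have H4 := step_dir (parse_ini ini_text) (PySem.Str.splitlines ini_text) frames shadows hrel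
    _ _ "StartFiringFrame" "FiringFrames" "FireUp" ([] ++ ["Walk"] ++ ["Ready"] ++ ["Die1"])
    (by decide) (by decide) H3.1 H3.2.1 (by decide) H3.2.2.1 H3.2.2.2.1 H3.2.2.2.2
  have H5 := step_idle (parse_ini ini_text) (PySem.Str.splitlines ini_text) frames shadows hrel
    _ _ "StartIdleFrame" "Idle1" ([] ++ ["Walk"] ++ ["Ready"] ++ ["Die1"] ++ ["FireUp"])
    hpre.2 H4.1 H4.2.1 (by decide) H4.2.2.1 H4.2.2.2.1 H4.2.2.2.2
  simp only [Prod.mk.injEq]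
  refine ⟨?_, H5.2.2.1, H5.2.2.2.1⟩
  apply congrArg (PySem.Str.join "\n")
  have hksub : List.Sublist
      (((stepA (parse_ini ini_text) frames shadows
        (stepA (parse_ini ini_text) frames shadows
          (stepA (parse_ini ini_text) frames shadows
            (stepA (parse_ini ini_text) frames shadows
              (stepA (parse_ini ini_text) frames shadows (PySem.Dict.empty, [], [], 0)
                (("StartWalkFrame", "WalkFrames"), "Walk"))
              (("StartStandFrame", "StandingFrames"), "Ready"))
            (("StartDeathFrame", "DeathFrames"), "Die1"))
          (("StartFiringFrame", "FiringFrames"), "FireUp"))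
        (("StartIdleFrame", "IdleFrames"), "Idle1")).1.items.map Prod.fst))
      ["Walk", "Ready", "Die1", "FireUp", "Idle1"] := by
    have := H5.2.1
    simpa using this
  have hr := render_fold ["Walk", "Ready", "Die1", "FireUp", "Idle1"] _ [] (by decide) hksub
  simp only [PySem.Dict.get?]
  simp only [List.foldl_cons, List.foldl_nil] at hr
  rw [hr]
  simpa using H5.1
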